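-- pv_equiv track=rewrite | github.com/IveKileff/UKC_Logbook | logbook_4_single_chart.py | categorise_climbs
-- ===== SOURCE A (Python) =====
-- def categorise_climbs(data):
--     '''categorise climbs using Style, and extract only Lead climbs'''
--     sport, boulder, trad, others = [], [], [], []
--     numbers = ['1', '2', '3', '4', '5', '6', '7', '8', '9']
--     letters = ['D', 'E', 'H', 'M', 'S', 'V']
--     while data:
--         climb = data.pop()
--         grade = climb[1]
--         style = climb[2]
--         if grade[0] in numbers and (
--             (style[0:4] == 'Lead' and style[0:6] != 'Lead d') or (
--                 style[0:5] == 'AltLd' and style[0:7] != 'AltLd d')):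
--             sport.append(climb)
--         elif grade[0] in letters and (
--             (style[0:4] == 'Lead' and style[0:6] != 'Lead d') or (
--                 style[0:5] == 'AltLd' and style[0:7] != 'AltLd d')):
--             trad.append(climb)
--         # elif grade[0] == 'f':
--         #     boulder.append(climb)
--         # else:
--         #     others.append(climb)
--     return sport, trad
-- ===== SOURCE B (Python) =====
-- def categorise_climbs(data):
--     '''categorise climbs using Style, and extract only Lead climbs'''
--     def is_lead(style):
--         return (style[0:4] == 'Lead' and style[0:6] != 'Lead d') or (
--             style[0:5] == 'AltLd' and style[0:7] != 'AltLd d')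
--     # one pass over reversed(data) keeps only the lead climbs (reversed matches A's
--     # pop-from-end order), then that list is split by first grade character
--     leads = [c for c in reversed(data) if is_lead(c[2])]
--     data.clear()  # A consumes data via pop(); keep the same observable side effect
--     sport = [c for c in leads if c[1][0] in '123456789']
--     trad = [c for c in leads if c[1][0] in 'DEHMSV']
--     return sport, trad
-- ===== Notes on version B (the rewrite author's own statement) =====
-- stated objective: simpler
-- what changed: A's destructive while/pop loop with an if/elif chain and four accumulators is replaced by a filter over reversed(data) for the shared lead predicate followed by two comprehensions splitting on the first grade character (data.clear() keeps A's consume-the-argument side effect).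
import Mathlib
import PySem

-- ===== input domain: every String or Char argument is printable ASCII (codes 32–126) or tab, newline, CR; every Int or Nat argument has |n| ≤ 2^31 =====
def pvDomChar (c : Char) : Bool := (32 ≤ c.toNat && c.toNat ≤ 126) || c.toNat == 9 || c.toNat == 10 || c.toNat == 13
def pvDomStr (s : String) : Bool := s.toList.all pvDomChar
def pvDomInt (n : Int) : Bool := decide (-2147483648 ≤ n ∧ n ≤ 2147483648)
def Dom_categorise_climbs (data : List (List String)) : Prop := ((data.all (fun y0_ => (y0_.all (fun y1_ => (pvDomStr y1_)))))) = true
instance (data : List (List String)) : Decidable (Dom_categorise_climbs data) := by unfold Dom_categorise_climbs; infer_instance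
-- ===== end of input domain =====

-- B replaces A's destructive while/pop + if/elif chain by one lead-filter over reversed(data)
-- followed by two comprehensions splitting on the first grade character (simpler decomposition);
-- equivalence is about the return value — both Pythons leave the argument list empty.


-- ===== PORT A =====
-- while data: climb = data.pop(); … — a pop-from-end loop is structural recursion over
-- data.reverse; sport/trad are the accumulators, appended at the back as Python's .append does.
-- climb[1], climb[2], grade[0] are PySem pyGet?; Pre_ makes them in range, so .getD defaults
-- are never taken inside Pre_. Python's 1-char string grade[0] and its membership in the
-- lists of 1-char strings is ported as the Char and membership in the corresponding Char list
-- (exact: both compare single characters). String slices are ported on .toList (exact).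
def goA : List (List String) → List (List String) → List (List String) →
    List (List String) × List (List String)
  | [], sport, trad => (sport, trad)
  | climb :: rest, sport, trad =>
    let grade := (PySem.List.pyGet? climb 1).getD ""
    let style := ((PySem.List.pyGet? climb 2).getD "").toList
    let g0 := (PySem.List.pyGet? grade.toList 0).getD ' '
    if ("123456789".toList.contains g0 &&
        ((PySem.List.slice style (some 0) (some 4) == "Lead".toList &&
          !(PySem.List.slice style (some 0) (some 6) == "Lead d".toList)) ||
         (PySem.List.slice style (some 0) (some 5) == "AltLd".toList &&
          !(PySem.List.slice style (some 0) (some 7) == "AltLd d".toList)))) then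
      goA rest (sport ++ [climb]) trad
    else if ("DEHMSV".toList.contains g0 &&
        ((PySem.List.slice style (some 0) (some 4) == "Lead".toList &&
          !(PySem.List.slice style (some 0) (some 6) == "Lead d".toList)) ||
         (PySem.List.slice style (some 0) (some 5) == "AltLd".toList &&
          !(PySem.List.slice style (some 0) (some 7) == "AltLd d".toList)))) then
      goA rest sport (trad ++ [climb])
    else
      goA rest sport trad

def categorise_climbs (data : List (List String)) : List (List String) × List (List String) :=
  goA data.reverse [] []

-- ===== PORT B =====
def is_lead (style : String) : Bool :=
  let st := style.toList
  (PySem.List.slice st (some 0) (some 4) == "Lead".toList &&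
   !(PySem.List.slice st (some 0) (some 6) == "Lead d".toList)) ||
  (PySem.List.slice st (some 0) (some 5) == "AltLd".toList &&
   !(PySem.List.slice st (some 0) (some 7) == "AltLd d".toList))

def grade0 (c : List String) : Char :=
  (PySem.List.pyGet? ((PySem.List.pyGet? c 1).getD "").toList 0).getD ' '

def categorise_climbs_alt (data : List (List String)) : List (List String) × List (List String) :=
  let leads := data.reverse.filter (fun c => is_lead ((PySem.List.pyGet? c 2).getD ""))
  let sport := leads.filter (fun c => "123456789".toList.contains (grade0 c))
  let trad := leads.filter (fun c => "DEHMSV".toList.contains (grade0 c))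
  (sport, trad)

-- ===== PRECONDITION & SPEC =====
-- Pre_ excludes exactly the inputs where A raises IndexError: a climb with fewer than 3
-- entries (climb[1]/climb[2]) or an empty grade string (grade[0]).
def Pre_categorise_climbs (data : List (List String)) : Prop :=
  ∀ c ∈ data, 3 ≤ c.length ∧ (c.getD 1 "").toList ≠ []
instance (data : List (List String)) : Decidable (Pre_categorise_climbs data) := by
  unfold Pre_categorise_climbs; infer_instance
def pvWitness_categorise_climbs : List (List String) :=
  [["r1", "6a", "Lead O/S"], ["r2", "VS 4c", "AltLd"], ["r3", "f6A", "Sent"]]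
def Spec_categorise_climbs (data : List (List String)) (out : List (List String) × List (List String)) : Prop := out = categorise_climbs_alt data
instance (data : List (List String)) (out : List (List String) × List (List String)) : Decidable (Spec_categorise_climbs data out) := by unfold Spec_categorise_climbs; infer_instance

-- ===== CLAIM (what is proved, stated in full; the proofs are below) =====
def Claim_equal_categorise_climbs : Prop := ∀ (data : List (List String)), Dom_categorise_climbs data → Pre_categorise_climbs data → Spec_categorise_climbs data (categorise_climbs data)

-- ===== LEMMAS AND PROOFS =====

def leadOf (c : List String) : Bool := is_lead ((PySem.List.pyGet? c 2).getD "")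
def isSport (c : List String) : Bool := "123456789".toList.contains (grade0 c) && leadOf c
def isTrad (c : List String) : Bool := "DEHMSV".toList.contains (grade0 c) && leadOf c

-- goA's cons step IS "if isSport then … elif isTrad then … else …" up to let-unfolding
theorem goA_cons (c : List String) (rest sport trad : List (List String)) :
    goA (c :: rest) sport trad =
      if isSport c then goA rest (sport ++ [c]) trad
      else if isTrad c then goA rest sport (trad ++ [c])
      else goA rest sport trad := rfl

theorem digit_not_letter (g : Char) (h : "123456789".toList.contains g = true) :
    "DEHMSV".toList.contains g = false := by
  have h9 : "123456789".toList = ['1','2','3','4','5','6','7','8','9'] := by decide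
  rw [h9] at h
  simp only [List.contains_eq_mem, decide_eq_true_eq, List.mem_cons, List.not_mem_nil,
    or_false] at h
  rcases h with rfl|rfl|rfl|rfl|rfl|rfl|rfl|rfl|rfl <;> decide

theorem goA_eq (l sport trad : List (List String)) :
    goA l sport trad = (sport ++ l.filter isSport, trad ++ l.filter isTrad) := by
  induction l generalizing sport trad with
  | nil => simp [goA]
  | cons c rest ih =>
    rw [goA_cons]
    by_cases hs : isSport c = true
    · have ht : isTrad c = false := by
        have hd : "123456789".toList.contains (grade0 c) = true := by
          have h' := hs; simp only [isSport, Bool.and_eq_true] at h'; exact h'.1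
        simp only [isTrad, digit_not_letter _ hd, Bool.false_and]
      rw [if_pos hs, ih]
      simp [hs, ht]
    · rw [if_neg hs]
      by_cases ht : isTrad c = true
      · rw [if_pos ht, ih]
        simp [Bool.eq_false_iff.2 hs, ht]
      · rw [if_neg ht, ih]
        simp [Bool.eq_false_iff.2 hs, Bool.eq_false_iff.2 ht]

theorem alt_eq (data : List (List String)) :
    categorise_climbs_alt data = (data.reverse.filter isSport, data.reverse.filter isTrad) := by
  simp only [categorise_climbs_alt, List.filter_filter, Prod.mk.injEq]
  exact ⟨List.filter_congr (fun c _ => by simp [isSport, leadOf]),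
         List.filter_congr (fun c _ => by simp [isTrad, leadOf])⟩

-- ===== VERDICT (by name: the statement is the Claim_ definition above) =====
theorem categorise_climbs_spec : Claim_equal_categorise_climbs := by
  intro data _ _
  show categorise_climbs data = categorise_climbs_alt data
  rw [categorise_climbs, goA_eq, alt_eq]
  simp
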